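-- pv_equiv track=rewrite | github.com/crolvlee/Algorithm | 프로그래머스/2/138476. 귤 고르기/귤 고르기.py | solution
-- ===== SOURCE A (Python) =====
-- def solution(k, tangerine):
--     t_dict = {}
--
--     for t in tangerine:
--         if t not in t_dict:
--             t_dict[t] = 1
--         else:
--             t_dict[t] += 1
--
--     t_dict_sorted = sorted(t_dict.items(), key=lambda x: x[1])
--
--     cnt = 0         # 제외한 귤의 개수
--     kind_cnt = len(t_dict_sorted)   # 선택한 귤의 종류
--     for t in t_dict_sorted:
--         now_cnt = t[1]
--
--         if cnt + now_cnt < len(tangerine) - k: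
--             kind_cnt -= 1
--             cnt += now_cnt
--         elif cnt + now_cnt == len(tangerine) - k:
--             kind_cnt -= 1
--             break
--         else:
--             break
--
--     answer = kind_cnt
--     return answer
-- ===== SOURCE B (Python) =====
-- def solution(k, tangerine):
--     freq = {}
--     for t in tangerine:
--         freq[t] = freq.get(t, 0) + 1
--     taken = 0
--     covered = 0
--     for c in sorted(freq.values(), reverse=True):
--         if covered >= k:
--             break
--         covered += c
--         taken += 1
--     return taken
-- ===== Notes on version B (the rewrite author's own statement) =====
-- stated objective: simpler
-- what changed: Instead of sorting (key,count) items ascending and greedily removing smallest counts until len(tangerine)-k is reached with two counters and three break branches, B sorts the counts descending and takes kinds while the covered sum is still below k, returning the number taken.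
import Mathlib
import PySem

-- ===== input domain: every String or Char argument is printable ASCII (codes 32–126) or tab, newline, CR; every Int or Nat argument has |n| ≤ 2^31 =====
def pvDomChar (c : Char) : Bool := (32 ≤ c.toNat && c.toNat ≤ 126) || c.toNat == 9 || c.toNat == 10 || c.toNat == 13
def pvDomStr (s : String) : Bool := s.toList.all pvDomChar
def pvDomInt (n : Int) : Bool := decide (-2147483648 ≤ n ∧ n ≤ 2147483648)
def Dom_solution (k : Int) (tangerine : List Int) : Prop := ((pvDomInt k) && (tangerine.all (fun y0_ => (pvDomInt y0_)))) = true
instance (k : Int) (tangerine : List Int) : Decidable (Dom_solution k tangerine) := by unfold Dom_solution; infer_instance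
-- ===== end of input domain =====

-- B replaces A's ascending removal loop (remove smallest counts toward len(tangerine)-k,
-- two counters, three break branches) by a descending take loop (take largest counts until
-- the covered sum reaches k); objective: simpler.

-- ===== PORT A =====
-- the 'for t in t_dict_sorted' loop with its two 'break's, as structural recursion
-- ('t_dict[t] += 1' reads an existing key, so 'getD t 0' is exact there)
def solGo (n k : Int) : List (Int × Int) → Int → Int → Int
  | [], _cnt, kind_cnt => kind_cnt
  | t :: rest, cnt, kind_cnt =>
    let now_cnt := t.2
    if cnt + now_cnt < n - k then solGo n k rest (cnt + now_cnt) (kind_cnt - 1)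
    else if cnt + now_cnt = n - k then kind_cnt - 1
    else kind_cnt

def solution (k : Int) (tangerine : List Int) : Int :=
  let t_dict : PySem.Dict Int Int :=
    tangerine.foldl
      (fun d t => if d.contains t = false then d.insert t 1 else d.insert t (d.getD t 0 + 1))
      PySem.Dict.empty
  let t_dict_sorted := PySem.List.sorted t_dict.items (fun x => x.2) false
  solGo (tangerine.length : Int) k t_dict_sorted 0 (t_dict_sorted.length : Int)

-- ===== PORT B =====
-- B's loop: take descending counts while covered < k
def altGo (k : Int) : List Int → Int → Int → Int
  | [], _covered, taken => taken
  | c :: rest, covered, taken =>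
    if covered ≥ k then taken else altGo k rest (covered + c) (taken + 1)

def solution_alt (k : Int) (tangerine : List Int) : Int :=
  let freq : PySem.Dict Int Int :=
    tangerine.foldl (fun d t => d.insert t (d.getD t 0 + 1)) PySem.Dict.empty
  altGo k (PySem.List.sorted freq.values (fun x => x) true) 0 0

-- ===== PRECONDITION & SPEC =====
def Spec_solution (k : Int) (tangerine : List Int) (out : Int) : Prop := out = solution_alt k tangerine
instance (k : Int) (tangerine : List Int) (out : Int) : Decidable (Spec_solution k tangerine out) := by unfold Spec_solution; infer_instance

-- ===== CLAIM (what is proved, stated in full; the proofs are below) =====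
def Claim_equal_solution : Prop := ∀ (k : Int) (tangerine : List Int), Dom_solution k tangerine → Spec_solution k tangerine (solution k tangerine)

-- ===== LEMMAS AND PROOFS =====

-- pure "removed count" of A's loop, over the counts only
def remA : Int → List Int → Int
  | _, [] => 0
  | T, c :: r => if c < T then 1 + remA (T - c) r else if c = T then 1 else 0

-- pure "taken count" of B's loop
def takeB : Int → List Int → Int
  | _, [] => 0
  | k, c :: r => if k ≤ 0 then 0 else 1 + takeB (k - c) r

theorem solGo_eq_remA (n k : Int) (l : List (Int × Int)) (cnt kind : Int) :
    solGo n k l cnt kind = kind - remA (n - k - cnt) (l.map (·.2)) := by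
  induction l generalizing cnt kind with
  | nil => simp [solGo, remA]
  | cons t rest ih =>
      simp only [solGo, List.map_cons, remA]
      by_cases h1 : cnt + t.2 < n - k
      · rw [if_pos h1, if_pos (by omega : t.2 < n - k - cnt), ih]
        have he : n - k - cnt - t.2 = n - k - (cnt + t.2) := by omega
        rw [← he]; ring
      · rw [if_neg h1, if_neg (by omega : ¬ t.2 < n - k - cnt)]
        by_cases h2 : cnt + t.2 = n - k
        · rw [if_pos h2, if_pos (by omega : t.2 = n - k - cnt)]
        · rw [if_neg h2, if_neg (by omega : ¬ t.2 = n - k - cnt)]; omega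

theorem altGo_eq_takeB (k : Int) (l : List Int) (covered taken : Int) :
    altGo k l covered taken = taken + takeB (k - covered) l := by
  induction l generalizing covered taken with
  | nil => simp [altGo, takeB]
  | cons c rest ih =>
      simp only [altGo, takeB]
      by_cases h : covered ≥ k
      · rw [if_pos h, if_pos (by omega : k - covered ≤ 0)]; omega
      · rw [if_neg h, if_neg (by omega : ¬ k - covered ≤ 0), ih]
        have : k - covered - c = k - (covered + c) := by omega
        rw [this]; omega

-- B's loop never reaches elements appended after the point where its sum covers k
theorem takeB_append_of_le (l l' : List Int) (k : Int) (h : k ≤ l.sum) :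
    takeB k (l ++ l') = takeB k l := by
  induction l generalizing k with
  | nil =>
      simp only [List.sum_nil] at h
      simp only [List.nil_append, takeB]
      cases l' with
      | nil => rfl
      | cons c r => simp [takeB, h]
  | cons c r ih =>
      simp only [List.cons_append, takeB]
      by_cases hk : k ≤ 0
      · simp [hk]
      · rw [if_neg hk, if_neg hk, ih]
        simp only [List.sum_cons] at h; omega

-- with positive counts, B's loop consumes the whole list when k is at least its sum
theorem takeB_all (l : List Int) (k : Int) (hpos : ∀ x ∈ l, 1 ≤ x) (h : l.sum ≤ k) :
    takeB k l = (l.length : Int) := by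
  induction l generalizing k with
  | nil => simp [takeB]
  | cons c r ih =>
      simp only [List.sum_cons] at h
      have hc : 1 ≤ c := hpos c (List.mem_cons_self ..)
      have hr : 0 ≤ r.sum :=
        List.sum_nonneg (fun x hx => le_trans (by omega) (hpos x (List.mem_cons_of_mem c hx)))
      rw [takeB, if_neg (by omega : ¬ k ≤ 0),
          ih (k - c) (fun x hx => hpos x (List.mem_cons_of_mem c hx)) (by omega)]
      simp only [List.length_cons]; push_cast; omega

-- with positive counts and k above the sum of l, B also consumes one appended element
theorem takeB_snoc (l : List Int) (c k : Int) (hpos : ∀ x ∈ l, 1 ≤ x) (h : l.sum < k) :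
    takeB k (l ++ [c]) = (l.length : Int) + 1 := by
  induction l generalizing k with
  | nil =>
      simp only [List.sum_nil] at h
      rw [List.nil_append, takeB, if_neg (by omega : ¬ k ≤ 0), takeB]
      simp
  | cons a r ih =>
      simp only [List.sum_cons] at h
      have ha : 1 ≤ a := hpos a (List.mem_cons_self ..)
      have hr : 0 ≤ r.sum :=
        List.sum_nonneg (fun x hx => le_trans (by omega) (hpos x (List.mem_cons_of_mem a hx)))
      rw [List.cons_append, takeB, if_neg (by omega : ¬ k ≤ 0),
          ih (k - a) (fun x hx => hpos x (List.mem_cons_of_mem a hx)) (by omega)]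
      simp only [List.length_cons]; push_cast; omega

-- the central identity: taking largest-first until k is covered = all kinds minus
-- removing smallest-first while the removed sum stays within sum - k
theorem takeB_reverse_eq (v : List Int) (hpos : ∀ x ∈ v, 1 ≤ x) (k : Int) :
    takeB k v.reverse = (v.length : Int) - remA (v.sum - k) v := by
  induction v generalizing k with
  | nil => simp [takeB, remA]
  | cons c r ih =>
      have hposr : ∀ x ∈ r, 1 ≤ x := fun x hx => hpos x (List.mem_cons_of_mem c hx)
      have hposrev : ∀ x ∈ r.reverse, 1 ≤ x := fun x hx => hposr x (List.mem_reverse.mp hx)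
      have hsumrev : r.reverse.sum = r.sum := by simp
      simp only [List.reverse_cons, List.sum_cons, remA, List.length_cons]
      by_cases h1 : c < c + r.sum - k
      · rw [if_pos h1, takeB_append_of_le _ _ _ (by omega), ih hposr]
        have he : c + r.sum - k - c = r.sum - k := by omega
        rw [he]; push_cast; omega
      · rw [if_neg h1]
        by_cases h2 : c = c + r.sum - k
        · rw [if_pos h2, takeB_append_of_le _ _ _ (by omega),
              takeB_all _ _ hposrev (by omega)]
          rw [List.length_reverse]; push_cast; omega
        · rw [if_neg h2, takeB_snoc _ _ _ hposrev (by omega)]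
          rw [List.length_reverse]; push_cast; omega

-- A's dict-building branch computes insert (getD + 1) in both branches
theorem dictA_eq_counter (tangerine : List Int) :
    tangerine.foldl
      (fun d t => if d.contains t = false then d.insert t 1 else d.insert t (d.getD t 0 + 1))
      PySem.Dict.empty = PySem.Dict.counter tangerine := by
  have hfun : ∀ (d : PySem.Dict Int Int) (t : Int), t ∈ tangerine →
      (if d.contains t = false then d.insert t 1 else d.insert t (d.getD t 0 + 1))
        = d.insert t (d.getD t 0 + 1) := by
    intro d t _
    by_cases h : d.contains t = false
    · rw [if_pos h, PySem.Dict.getD_of_not_contains _ _ h]; norm_num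
    · rw [if_neg h]
  rw [PySem.List.foldl_congr_mem tangerine _ _ _ hfun,
      PySem.Dict.foldl_insert_getD_add_one_eq_counter]

-- descending-sorted counts are the reverse of the counts of the ascending-by-count items
theorem sorted_values_rev (items : List (Int × Int)) :
    PySem.List.sorted (items.map (·.2)) (fun x => x) true
      = ((PySem.List.sorted items (fun x => x.2) false).map (·.2)).reverse := by
  have hL : (PySem.List.sorted (items.map (·.2)) (fun x => x) true).reverse.Pairwise (· ≤ ·) := by
    rw [List.pairwise_reverse]
    exact (PySem.List.sorted_pairwise_rev (items.map (·.2)) (fun x => x)).imp (fun h => h)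
  have hR : ((PySem.List.sorted items (fun x => x.2) false).map (·.2)).Pairwise (· ≤ ·) :=
    PySem.List.sorted_map_key_pairwise items (fun x => x.2)
  have hperm : (PySem.List.sorted (items.map (·.2)) (fun x => x) true).reverse.Perm
      ((PySem.List.sorted items (fun x => x.2) false).map (·.2)) :=
    (List.reverse_perm _).trans
      ((PySem.List.sorted_perm _ _ _).trans ((PySem.List.sorted_perm items _ _).map (·.2)).symm)
  have heq := PySem.List.eq_of_perm_of_pairwise_le_of_injective (fun x : Int => x)
    (fun _ _ h => h) hperm hL hR
  calc PySem.List.sorted (items.map (·.2)) (fun x => x) true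
      = (PySem.List.sorted (items.map (·.2)) (fun x => x) true).reverse.reverse := by
        rw [List.reverse_reverse]
    _ = _ := by rw [heq]

-- the distinct elements in first-occurrence order are a permutation of dedup
theorem ofList_perm_dedup (l : List Int) : (PySem.Set.ofList l).Perm l.dedup := by
  apply List.perm_of_nodup_nodup_toFinset_eq (PySem.Set.nodup_ofList l) l.nodup_dedup
  ext x
  simp [PySem.Set.mem_ofList]

theorem sum_map_natCast (m : List Int) (f : Int → Nat) :
    (m.map fun x => ((f x : Int))).sum = ((m.map f).sum : Nat) := by
  induction m with
  | nil => simp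
  | cons a t ih => simp [ih]

-- the counter's values sum to the length of the list
theorem sum_counter_values (l : List Int) :
    ((PySem.Dict.counter l).items.map (·.2)).sum = (l.length : Int) := by
  rw [PySem.Dict.items_counter, List.map_map]
  have hc : ((fun x : Int × Int => x.2) ∘ fun k => (k, (l.count k : Int)))
      = fun k => ((l.count k : Int)) := rfl
  rw [hc, List.Perm.sum_eq ((ofList_perm_dedup l).map _), sum_map_natCast,
      List.sum_map_count_dedup_eq_length]

-- every value of the counter is a positive count
theorem counter_values_pos (l : List Int) :
    ∀ x ∈ (PySem.Dict.counter l).items.map (·.2), 1 ≤ x := by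
  intro x hx
  rw [PySem.Dict.items_counter, List.map_map] at hx
  have hc : ((fun x : Int × Int => x.2) ∘ fun k => (k, (l.count k : Int)))
      = fun k => ((l.count k : Int)) := rfl
  rw [hc] at hx
  obtain ⟨kk, hk, rfl⟩ := List.mem_map.mp hx
  have hmem : kk ∈ l := (PySem.Set.mem_ofList l kk).mp hk
  exact_mod_cast List.one_le_count_iff.mpr hmem

-- ===== VERDICT (by name: the statement is the Claim_ definition above) =====
theorem solution_spec : Claim_equal_solution := by
  intro k tangerine _
  unfold Spec_solution
  simp only [solution, solution_alt]
  rw [dictA_eq_counter, PySem.Dict.foldl_insert_getD_add_one_eq_counter]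
  have hvals : (PySem.Dict.counter tangerine).values
      = (PySem.Dict.counter tangerine).items.map (·.2) := rfl
  rw [hvals, sorted_values_rev, solGo_eq_remA, altGo_eq_takeB,
      takeB_reverse_eq _ (fun x hx => counter_values_pos tangerine x
        ((((PySem.List.sorted_perm (PySem.Dict.counter tangerine).items (fun x => x.2) false).map (·.2)).mem_iff).mp hx))]
  have hsum : ((PySem.List.sorted (PySem.Dict.counter tangerine).items (fun x => x.2) false).map (·.2)).sum
      = (tangerine.length : Int) := by
    rw [List.Perm.sum_eq ((PySem.List.sorted_perm (PySem.Dict.counter tangerine).items (fun x => x.2) false).map (·.2))]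
    exact sum_counter_values tangerine
  rw [hsum]
  rw [List.length_map, PySem.List.length_sorted]
  simp only [sub_zero]
  omega
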